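-- pv_equiv track=rewrite | github.com/sharshach/verify-nitdgp | python/main.py | encodeIntoAlphaNumeric32
-- ===== SOURCE A (Python) =====
-- def encodeIntoAlphaNumeric32(x):
--     an=['A','B','C','D','E','F','G','H','I','J','K','L','M','N','O','P','Q','R','S','T','U','V','W','X','Y','Z','0','1','2','3','4','5']
--     s=""
--     temp=0
--     cnt=0
--     for i in x:
--         for j in i:
--             temp=temp*2+(0 if j==0 else 1)
--             cnt+=1
--             if cnt==5:
--                 s+=an[temp]
--                 temp=0
--                 cnt=0
--     return s
-- ===== SOURCE B (Python) =====
-- def encodeIntoAlphaNumeric32(x):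
--     an = "ABCDEFGHIJKLMNOPQRSTUVWXYZ012345"
--     bits = [0 if j == 0 else 1 for i in x for j in i]
--     out = []
--     k = 0
--     while k + 5 <= len(bits):
--         out.append(an[bits[k] * 16 + bits[k + 1] * 8 + bits[k + 2] * 4
--                       + bits[k + 3] * 2 + bits[k + 4]])
--         k += 5
--     return ''.join(out)
-- ===== Notes on version B (the rewrite author's own statement) =====
-- stated objective: alternative
-- what changed: Replaces A's single interleaved pass with temp/cnt accumulator state by a two-phase flatten-then-chunk decomposition: first flatten all rows into a normalized bit list, then consume it five bits at a time, packing each full group arithmetically and joining the collected characters.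
import Mathlib
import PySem

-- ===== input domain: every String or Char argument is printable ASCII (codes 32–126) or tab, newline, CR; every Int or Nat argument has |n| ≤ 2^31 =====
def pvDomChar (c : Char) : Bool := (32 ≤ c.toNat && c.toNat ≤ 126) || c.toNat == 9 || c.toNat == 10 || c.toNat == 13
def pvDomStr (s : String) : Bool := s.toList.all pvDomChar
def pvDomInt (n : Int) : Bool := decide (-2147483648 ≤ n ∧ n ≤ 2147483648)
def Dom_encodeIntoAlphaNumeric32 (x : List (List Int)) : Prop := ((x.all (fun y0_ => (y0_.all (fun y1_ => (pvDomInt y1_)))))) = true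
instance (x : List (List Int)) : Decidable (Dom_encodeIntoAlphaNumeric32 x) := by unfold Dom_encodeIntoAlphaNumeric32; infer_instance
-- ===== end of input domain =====

-- B is an alternative decomposition of the same encoding: flatten all rows into a normalized
-- bit list first, then pack full 5-bit groups by an index walk; same O(n) cost, no interleaved state.
-- Strings are built on the List Char side (String.ofList at the end) so the kernel can reduce them.

-- ===== PORT A =====
-- the literal `an` table (shared lookup table of both Pythons)
def pvAn : List Char :=
  ['A','B','C','D','E','F','G','H','I','J','K','L','M','N','O','P','Q','R','S','T','U','V','W','X','Y','Z','0','1','2','3','4','5']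

-- one inner-loop step of A over state (s, temp, cnt); an[temp] is PySem.List.pyGet? (always in range here)
def pvStepA (st : List Char × Int × Int) (j : Int) : List Char × Int × Int :=
  let temp := st.2.1 * 2 + (if j = 0 then 0 else 1)
  let cnt := st.2.2 + 1
  if cnt = 5 then (st.1 ++ [(PySem.List.pyGet? pvAn temp).getD 'A'], 0, 0)
  else (st.1, temp, cnt)

def encodeIntoAlphaNumeric32 (x : List (List Int)) : String :=
  String.ofList (x.foldl (fun st i => i.foldl pvStepA st) ([], 0, 0)).1

-- ===== PORT B =====
-- B's while-loop: walk the bit list with index k, packing each full 5-bit group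
def pvPackLoop (bits : List Int) (k : Nat) (out : List Char) : List Char :=
  if _h : k + 5 ≤ bits.length then
    pvPackLoop bits (k + 5)
      (out ++ [(PySem.List.pyGet? pvAn
          (PySem.List.pyGetD bits (k : Int) 0 * 16 + PySem.List.pyGetD bits ((k : Int) + 1) 0 * 8
            + PySem.List.pyGetD bits ((k : Int) + 2) 0 * 4 + PySem.List.pyGetD bits ((k : Int) + 3) 0 * 2
            + PySem.List.pyGetD bits ((k : Int) + 4) 0)).getD 'A'])
  else out
termination_by bits.length - k
decreasing_by omega

def encodeIntoAlphaNumeric32_alt (x : List (List Int)) : String :=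
  String.ofList (pvPackLoop (x.flatMap (fun i => i.map (fun j => if j = 0 then (0 : Int) else 1))) 0 [])

-- ===== PRECONDITION & SPEC =====
def Spec_encodeIntoAlphaNumeric32 (x : List (List Int)) (out : String) : Prop := out = encodeIntoAlphaNumeric32_alt x
instance (x : List (List Int)) (out : String) : Decidable (Spec_encodeIntoAlphaNumeric32 x out) := by unfold Spec_encodeIntoAlphaNumeric32; infer_instance

-- ===== CLAIM (what is proved, stated in full; the proofs are below) =====
def Claim_equal_encodeIntoAlphaNumeric32 : Prop := ∀ (x : List (List Int)), Dom_encodeIntoAlphaNumeric32 x → Spec_encodeIntoAlphaNumeric32 x (encodeIntoAlphaNumeric32 x)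

-- ===== LEMMAS AND PROOFS =====

-- proof-side recursion: pack a bit list five at a time (the common characterisation of both ports)
def pvPack5 : List Int → List Char
  | b0 :: b1 :: b2 :: b3 :: b4 :: rest =>
      (PySem.List.pyGet? pvAn (b0 * 16 + b1 * 8 + b2 * 4 + b3 * 2 + b4)).getD 'A' :: pvPack5 rest
  | _ => []

-- A's step, with the bit normalization factored out (pvStepA st j = pvStepN st (bit j) by rfl)
def pvStepN (st : List Char × Int × Int) (c : Int) : List Char × Int × Int :=
  let temp := st.2.1 * 2 + c
  let cnt := st.2.2 + 1
  if cnt = 5 then (st.1 ++ [(PySem.List.pyGet? pvAn temp).getD 'A'], 0, 0)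
  else (st.1, temp, cnt)

-- A's fold over a bit list, starting a fresh group, emits exactly the packed full groups.
theorem pvFoldN_eq_pack5 (bs : List Int) (s : List Char) :
    (List.foldl pvStepN (s, 0, 0) bs).1 = s ++ pvPack5 bs := by
  induction bs using pvPack5.induct generalizing s with
  | case1 c0 c1 c2 c3 c4 rest ih =>
      rw [List.foldl_cons, List.foldl_cons, List.foldl_cons, List.foldl_cons, List.foldl_cons]
      simp only [pvStepN, pvPack5]
      norm_num
      rw [ih]
      have : c0 * 16 + c1 * 8 + c2 * 4 + c3 * 2 + c4
          = (((c0 * 2 + c1) * 2 + c2) * 2 + c3) * 2 + c4 := by ring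
      rw [this]
      simp
  | case2 bs h =>
      rcases bs with _ | ⟨a, _ | ⟨b, _ | ⟨c, _ | ⟨d, _ | ⟨e, rest⟩⟩⟩⟩⟩
      · simp [pvPack5]
      · simp [List.foldl, pvStepN, pvPack5]
      · simp [List.foldl, pvStepN, pvPack5]
      · simp [List.foldl, pvStepN, pvPack5]
      · simp [List.foldl, pvStepN, pvPack5]
      · exact absurd rfl (h a b c d e rest)

-- B's index walk from k is the packing of the bits from k on.
theorem pvPackLoop_eq_pack5 (bits : List Int) (k : Nat) (out : List Char) :
    pvPackLoop bits k out = out ++ pvPack5 (bits.drop k) := by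
  induction k, out using pvPackLoop.induct bits with
  | case1 k out h ih =>
      rw [pvPackLoop, dif_pos h, ih]
      have hd : bits.drop k = bits[k]'(by omega) :: bits[k+1]'(by omega) :: bits[k+2]'(by omega)
          :: bits[k+3]'(by omega) :: bits[k+4]'(by omega) :: bits.drop (k+5) := by
        rw [List.drop_eq_getElem_cons (by omega), List.drop_eq_getElem_cons (by omega),
          List.drop_eq_getElem_cons (by omega), List.drop_eq_getElem_cons (by omega),
          List.drop_eq_getElem_cons (by omega)]
      rw [hd]
      simp only [pvPack5, List.append_assoc, List.singleton_append]
      have e1 : ((k : Int) + 1) = ((k + 1 : Nat) : Int) := by push_cast; ring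
      have e2 : ((k : Int) + 2) = ((k + 2 : Nat) : Int) := by push_cast; ring
      have e3 : ((k : Int) + 3) = ((k + 3 : Nat) : Int) := by push_cast; ring
      have e4 : ((k : Int) + 4) = ((k + 4 : Nat) : Int) := by push_cast; ring
      rw [e1, e2, e3, e4]
      simp only [PySem.List.pyGetD_natCast]
      rw [List.getD_eq_getElem bits 0 (by omega), List.getD_eq_getElem bits 0 (by omega),
        List.getD_eq_getElem bits 0 (by omega), List.getD_eq_getElem bits 0 (by omega),
        List.getD_eq_getElem bits 0 (by omega)]
  | case2 k out h =>
      rw [pvPackLoop, dif_neg h]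
      have : pvPack5 (bits.drop k) = [] := by
        rcases hb : bits.drop k with _ | ⟨a, _ | ⟨b, _ | ⟨c, _ | ⟨d, _ | ⟨e, rest⟩⟩⟩⟩⟩ <;>
          first
          | (exfalso
             have hlen := congrArg List.length hb
             simp [List.length_drop] at hlen
             omega)
          | simp [pvPack5]
      rw [this, List.append_nil]

-- ===== VERDICT (by name: the statement is the Claim_ definition above) =====
theorem encodeIntoAlphaNumeric32_spec : Claim_equal_encodeIntoAlphaNumeric32 := by
  intro x _
  unfold Spec_encodeIntoAlphaNumeric32 encodeIntoAlphaNumeric32 encodeIntoAlphaNumeric32_alt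
  rw [pvPackLoop_eq_pack5]
  simp only [List.drop_zero, List.nil_append]
  have h1 : (x.flatMap (fun i => i.map (fun j => if j = 0 then (0 : Int) else 1))).foldl
        pvStepN (([] : List Char), 0, 0)
      = x.foldl (fun st i => i.foldl pvStepA st) ([], 0, 0) := by
    rw [List.foldl_flatMap]
    congr 1
    funext st i
    rw [List.foldl_map]
    rfl
  rw [← h1, pvFoldN_eq_pack5]
  simp
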